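-- pv_equiv track=rewrite | github.com/duckbill413/coding_test | python/2022_kakao_db/3.py | solution
-- ===== SOURCE A (Python) =====
-- def solution(box):
--     n = len(box)
--     summary = [0] * n
--     summary[0] = box[0]
--
--     for i in range(1, n):
--         summary[i] = summary[i-1] + box[i]
--
--     mean = [0] * n
--     for i in range(n):
--         mean[i] = summary[i] // (i+1)
--
--     max_mean = max(mean)
--     index = mean.index(max_mean)
--
--     if summary[index] % max_mean == 0:
--         return max_mean
--     else:
--         return max_mean + 1
-- ===== SOURCE B (Python) =====
-- def solution(box):
--     s = sum(box)
--     best_mean = None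
--     best_sum = None
--     i = len(box) - 1
--     while i >= 0:
--         m = s // (i + 1)
--         if best_mean is None or m >= best_mean:
--             best_mean, best_sum = m, s
--         s -= box[i]
--         i -= 1
--     return best_mean if best_sum % best_mean == 0 else best_mean + 1
-- ===== Notes on version B (the rewrite author's own statement) =====
-- stated objective: alternative
-- what changed: B traverses backwards: it takes the total sum once and walks i from n-1 down to 0, subtracting box[i] to recover each prefix sum, keeping a >=-wins running best so the earliest index prevails; no summary/mean arrays and no separate max()/index() scans
import Mathlib
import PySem

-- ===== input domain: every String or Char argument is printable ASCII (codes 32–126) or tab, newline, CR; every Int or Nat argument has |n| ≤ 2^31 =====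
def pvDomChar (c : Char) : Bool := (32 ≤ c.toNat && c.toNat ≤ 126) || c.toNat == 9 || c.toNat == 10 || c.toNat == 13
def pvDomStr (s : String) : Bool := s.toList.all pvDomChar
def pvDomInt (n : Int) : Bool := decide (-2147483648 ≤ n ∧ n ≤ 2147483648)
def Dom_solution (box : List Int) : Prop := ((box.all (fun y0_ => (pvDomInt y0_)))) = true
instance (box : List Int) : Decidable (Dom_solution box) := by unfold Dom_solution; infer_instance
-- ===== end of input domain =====

-- B scans BACKWARDS: total sum once, then i = n-1 … 0, subtracting box[i] to recover each
-- prefix sum, with a >=-wins running best so the earliest index prevails; objective: alternative.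

-- ===== PORT A =====
def solution (box : List Int) : Int :=
  let n : Int := PySem.List.len box
  let summary0 : List Int := (List.replicate n.toNat (0 : Int)).set 0 (PySem.List.pyGetD box 0 0)
  let summary : List Int := (PySem.List.pyRange 1 n 1).foldl
      (fun acc i => acc.set i.toNat (PySem.List.pyGetD acc (i - 1) 0 + PySem.List.pyGetD box i 0))
      summary0
  let mean : List Int := (PySem.List.pyRange 0 n 1).foldl
      (fun acc i => acc.set i.toNat (PySem.Int.floordiv (PySem.List.pyGetD summary i 0) (i + 1)))
      (List.replicate n.toNat (0 : Int))
  let maxMean : Int := (PySem.List.max? mean (fun y => y)).getD 0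
  let index : Nat := (PySem.List.index? mean maxMean).getD 0
  if PySem.Int.mod (PySem.List.pyGetD summary (index : Int) 0) maxMean = 0 then maxMean
  else maxMean + 1

-- ===== PORT B =====
-- the while loop of Source B: j plays the role of i+1, so i = j-1 and the loop stops at j = 0
def altLoop (box : List Int) : Nat → Int → Option (Int × Int) → Option (Int × Int)
  | 0, _, st => st
  | j + 1, s, st =>
      let m := PySem.Int.floordiv s ((j : Int) + 1)
      let st' := match st with
        | none => some (m, s)
        | some (bm, bs) => if bm ≤ m then some (m, s) else some (bm, bs)
      altLoop box j (s - PySem.List.pyGetD box (j : Int) 0) st'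

def solution_alt (box : List Int) : Int :=
  match altLoop box box.length box.sum none with
  | some (bm, bs) => if PySem.Int.mod bs bm = 0 then bm else bm + 1
  | none => 0   -- unreachable for nonempty box; Python raises on [] (outside Pre_)

-- ===== PRECONDITION & SPEC =====
-- Pre_ excludes exactly the inputs on which the Python A raises: the empty list (IndexError at
-- the first subscript) and lists whose maximal prefix floor-mean is 0 (ZeroDivisionError at
-- the final modulo); A returns on every input admitted here, and B raises on the same excluded inputs.
def Pre_solution (box : List Int) : Prop :=
  box ≠ [] ∧
    ((∃ i < box.length, 0 < PySem.Int.floordiv ((box.take (i + 1)).sum) ((i : Int) + 1)) ∨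
      (∀ i < box.length, PySem.Int.floordiv ((box.take (i + 1)).sum) ((i : Int) + 1) ≠ 0))
instance (box : List Int) : Decidable (Pre_solution box) := by unfold Pre_solution; infer_instance

def pvWitness_solution : List Int := ([1, 2] : List Int)

def Spec_solution (box : List Int) (out : Int) : Prop := out = solution_alt box
instance (box : List Int) (out : Int) : Decidable (Spec_solution box out) := by
  unfold Spec_solution; infer_instance

-- ===== CLAIM (what is proved, stated in full; the proofs are below) =====
def Claim_equal_solution : Prop :=
  ∀ (box : List Int), Dom_solution box → Pre_solution box → Spec_solution box (solution box)

-- ===== LEMMAS AND PROOFS =====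

-- prefix sum of the first k elements, and the floor-mean of the first i+1 elements
def pvS (box : List Int) (k : Nat) : Int := (box.take k).sum
def pvMean (box : List Int) (i : Nat) : Int := PySem.Int.floordiv (pvS box (i + 1)) ((i : Int) + 1)
-- the array state of a fill loop that has written f 0 … f (j-1)
def pvPartial (n j : Nat) (f : Nat → Int) : List Int :=
  (List.range n).map (fun i => if i < j then f i else 0)

lemma pvS_succ (box : List Int) (k : Nat) (hk : k < box.length) :
    pvS box (k + 1) = pvS box k + box[k] := by
  simp [pvS, List.sum_take_succ box k hk]

lemma pvPartial_set (n j : Nat) (f : Nat → Int) (_hj : j < n) :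
    (pvPartial n j f).set j (f j) = pvPartial n (j + 1) f := by
  refine List.ext_getElem (by simp [pvPartial]) ?_
  intro i h1 h2
  simp only [pvPartial, List.getElem_set, List.getElem_map, List.getElem_range]
  rcases eq_or_ne j i with h | h
  · subst h; simp
  · rw [if_neg h]
    by_cases hij : i < j
    · simp [hij, (by omega : i < j + 1)]
    · have h2' : ¬ i < j + 1 := by omega
      simp [hij, h2']

lemma pvPartial_getD (n j : Nat) (f : Nat → Int) (k : Nat) (hk : k < n) (hkj : k < j) :
    PySem.List.pyGetD (pvPartial n j f) (k : Int) 0 = f k := by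
  unfold pvPartial
  rw [PySem.List.pyGetD_natCast, PySem.List.getD_map_range _ _ _ _ hk]
  simp [hkj]

lemma pvPartial_top (n : Nat) (f : Nat → Int) :
    pvPartial n n f = (List.range n).map f := by
  unfold pvPartial
  apply List.map_congr_left
  intro i hi
  simp [List.mem_range.mp hi]

-- A's first loop: summary is the prefix-sum array
lemma pvFillA (box : List Int) (hbox : box ≠ []) (j : Nat) (h1 : 1 ≤ j) (hj : j ≤ box.length) :
    (PySem.List.pyRange 1 (j : Int) 1).foldl
      (fun acc i => acc.set i.toNat (PySem.List.pyGetD acc (i - 1) 0 + PySem.List.pyGetD box i 0))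
      ((List.replicate box.length (0 : Int)).set 0 (PySem.List.pyGetD box 0 0))
    = pvPartial box.length j (fun i => pvS box (i + 1)) := by
  induction j with
  | zero => omega
  | succ m ih =>
    rcases Nat.eq_zero_or_pos m with hm | hm
    · subst hm
      rw [show (((0:Nat)+1 : Nat) : Int) = 1 by norm_num, PySem.List.pyRange_one_eq_nil (le_refl 1)]
      simp only [List.foldl_nil]
      obtain ⟨y, t, rfl⟩ := List.exists_cons_of_ne_nil hbox
      refine List.ext_getElem (by simp [pvPartial]) ?_
      intro i hi1 hi2
      simp only [pvPartial, List.getElem_set, List.getElem_map, List.getElem_range]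
      rcases Nat.eq_zero_or_pos i with h0 | h0
      · subst h0
        simp [pvS, PySem.List.pyGetD, PySem.List.pyGet?, PySem.List.pyIdx?]
      · rw [if_neg (by omega), if_neg (by omega)]
        simp only [List.length_set, List.length_replicate] at hi1
        simp [List.getElem_replicate]
    · have hmn : m < box.length := by omega
      rw [show ((m+1 : Nat) : Int) = (m:Int) + 1 by push_cast; ring,
        PySem.List.pyRange_one_succ_right (by exact_mod_cast hm), List.foldl_append,
        ih hm (by omega)]
      simp only [List.foldl_cons, List.foldl_nil]
      rw [show ((m:Int) - 1) = (((m-1:Nat)):Int) by omega,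
        pvPartial_getD _ _ _ _ (by omega) (by omega),
        PySem.List.pyGetD_natCast box m 0, List.getD_eq_getElem _ _ hmn,
        Int.toNat_natCast,
        show pvS box ((m-1)+1) + box[m] = pvS box (m+1) by
          rw [show (m-1)+1 = m by omega, ← pvS_succ box m hmn]]
      exact pvPartial_set box.length m _ hmn

-- A's second loop: mean is the floor-mean array
lemma pvFillMean (box : List Int) (j : Nat) (hj : j ≤ box.length) :
    (PySem.List.pyRange 0 (j : Int) 1).foldl
      (fun acc i => acc.set i.toNat
        (PySem.Int.floordiv
          (PySem.List.pyGetD ((List.range box.length).map (fun k => pvS box (k + 1))) i 0)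
          (i + 1)))
      (List.replicate box.length (0 : Int))
    = pvPartial box.length j (pvMean box) := by
  induction j with
  | zero =>
    rw [show ((0:Nat):Int) = 0 by norm_num, PySem.List.pyRange_one_eq_nil (le_refl 0)]
    simp only [List.foldl_nil]
    refine List.ext_getElem (by simp [pvPartial]) ?_
    intro i hi1 hi2
    simp [pvPartial, List.getElem_replicate]
  | succ m ih =>
    have hmn : m < box.length := by omega
    rw [show ((m+1 : Nat) : Int) = (m:Int) + 1 by push_cast; ring,
      PySem.List.pyRange_one_succ_right (by positivity), List.foldl_append,
      ih (by omega)]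
    simp only [List.foldl_cons, List.foldl_nil]
    rw [PySem.List.pyGetD_natCast, PySem.List.getD_map_range _ _ _ _ hmn, Int.toNat_natCast]
    exact pvPartial_set box.length m (pvMean box) hmn

-- first argmax of the prefix floor-means over [0, k)
lemma pvFirstArgmax (box : List Int) (k : Nat) (h1 : 1 ≤ k) :
    ∃ i, i < k ∧ (∀ j, j < k → pvMean box j ≤ pvMean box i) ∧
      (∀ j, j < i → pvMean box j < pvMean box i) := by
  induction k with
  | zero => omega
  | succ m ih =>
    rcases Nat.eq_zero_or_pos m with hm | hm
    · subst hm
      exact ⟨0, by omega, by intro j hj; interval_cases j; exact le_refl _,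
        by intro j hj; omega⟩
    · obtain ⟨i, hik, hub, hlt⟩ := ih hm
      by_cases hc : pvMean box i < pvMean box m
      · refine ⟨m, by omega, ?_, ?_⟩
        · intro j hj
          rcases Nat.lt_succ_iff_lt_or_eq.mp hj with h | h
          · exact le_of_lt (lt_of_le_of_lt (hub j h) hc)
          · subst h; exact le_refl _
        · intro j hj; exact lt_of_le_of_lt (hub j hj) hc
      · refine ⟨i, by omega, ?_, hlt⟩
        intro j hj
        rcases Nat.lt_succ_iff_lt_or_eq.mp hj with h | h
        · exact hub j h
        · subst h; exact not_lt.mp hc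

-- the running sum entering iteration j-1 is the prefix sum pvS box j
lemma pvS_step (box : List Int) (j : Nat) (hj : j < box.length) :
    pvS box (j + 1) - PySem.List.pyGetD box (j : Int) 0 = pvS box j := by
  rw [PySem.List.pyGetD_natCast box j 0, List.getD_eq_getElem _ _ hj, pvS_succ box j hj]
  ring

-- if every remaining mean is strictly below the held best, the loop keeps the accumulator
lemma altLoop_lt (box : List Int) (j : Nat) (hj : j ≤ box.length) (bm bs : Int)
    (h : ∀ i, i < j → pvMean box i < bm) :
    altLoop box j (pvS box j) (some (bm, bs)) = some (bm, bs) := by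
  induction j with
  | zero => rfl
  | succ m ih =>
    simp only [altLoop]
    rw [if_neg (by exact not_le.mpr (h m (by omega))), pvS_step box m (by omega)]
    exact ih (by omega) (fun i hi => h i (by omega))

-- if the first argmax i0 over [0, j) beats the held best, the loop ends at (mean i0, S (i0+1))
lemma altLoop_ge (box : List Int) (j : Nat) (hj : j ≤ box.length) (i0 : Nat) (hi0 : i0 < j)
    (hub : ∀ i, i < j → pvMean box i ≤ pvMean box i0)
    (hlt : ∀ i, i < i0 → pvMean box i < pvMean box i0)
    (bm bs : Int) (hbm : bm ≤ pvMean box i0) :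
    altLoop box j (pvS box j) (some (bm, bs)) = some (pvMean box i0, pvS box (i0 + 1)) := by
  induction j generalizing bm bs with
  | zero => omega
  | succ m ih =>
    simp only [altLoop]
    rw [show PySem.Int.floordiv (pvS box (m + 1)) ((m : Int) + 1) = pvMean box m from rfl]
    rcases eq_or_ne i0 m with rfl | hne
    · rw [if_pos (by exact hbm), pvS_step box i0 (by omega)]
      exact altLoop_lt box i0 (by omega) _ _ hlt
    · have him : i0 < m := by omega
      have hmle : pvMean box m ≤ pvMean box i0 := hub m (by omega)
      rw [pvS_step box m (by omega)]
      by_cases hc : bm ≤ pvMean box m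
      · rw [if_pos hc]
        exact ih (by omega) him (fun i hi => hub i (by omega)) _ _ hmle
      · rw [if_neg hc]
        exact ih (by omega) him (fun i hi => hub i (by omega)) _ _ hbm

-- B's whole loop from the none state, for a nonempty box
lemma altLoop_spec (box : List Int) (hne : box ≠ []) (i0 : Nat) (hi0 : i0 < box.length)
    (hub : ∀ i, i < box.length → pvMean box i ≤ pvMean box i0)
    (hlt : ∀ i, i < i0 → pvMean box i < pvMean box i0) :
    altLoop box box.length box.sum none = some (pvMean box i0, pvS box (i0 + 1)) := by
  obtain ⟨m, hm⟩ : ∃ m, box.length = m + 1 :=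
    ⟨box.length - 1, by have := List.length_pos_of_ne_nil hne; omega⟩
  have hsum : box.sum = pvS box (m + 1) := by
    rw [pvS, ← hm, List.take_length]
  rw [hm, hsum]
  simp only [altLoop]
  rw [pvS_step box m (by omega)]
  rcases eq_or_ne i0 m with rfl | hne'
  · exact altLoop_lt box i0 (by omega) _ _ hlt
  · have him : i0 < m := by omega
    exact altLoop_ge box m (by omega) i0 him (fun i hi => hub i (by omega)) hlt _ _
      (hub m (by omega))

-- ===== VERDICT (by name: the statement is the Claim_ definition above) =====
theorem solution_spec : Claim_equal_solution := by
  intro box _hdom hpre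
  obtain ⟨hne, -⟩ := hpre
  have hn : 1 ≤ box.length := List.length_pos_of_ne_nil hne
  unfold Spec_solution
  obtain ⟨i, hik, hub, hlt⟩ := pvFirstArgmax box box.length hn
  -- B's side
  have hB : solution_alt box =
      (if PySem.Int.mod (pvS box (i+1)) (pvMean box i) = 0 then pvMean box i
       else pvMean box i + 1) := by
    simp only [solution_alt]
    rw [altLoop_spec box hne i hik hub hlt]
  -- A's side
  simp only [solution, PySem.List.len_eq, Int.toNat_natCast]
  rw [pvFillA box hne box.length hn (le_refl _), pvPartial_top,
    pvFillMean box box.length (le_refl _), pvPartial_top]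
  have hmem : pvMean box i ∈ (List.range box.length).map (pvMean box) :=
    List.mem_map.mpr ⟨i, List.mem_range.mpr hik, rfl⟩
  rcases hmax : PySem.List.max? ((List.range box.length).map (pvMean box)) (fun y => y)
    with - | m
  · rw [PySem.List.max?_eq_none_iff] at hmax
    simp at hmax
    exact absurd hmax (by omega)
  · have h1 : m ≤ pvMean box i := by
      obtain ⟨j, hj, rfl⟩ := List.mem_map.mp (PySem.List.max?_mem hmax)
      exact hub j (List.mem_range.mp hj)
    have h2 : pvMean box i ≤ m := PySem.List.max?_isMax hmax _ hmem
    have hm : m = pvMean box i := le_antisymm h1 h2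
    subst hm
    have hidx : PySem.List.index? ((List.range box.length).map (pvMean box)) (pvMean box i)
        = some i := by
      rw [PySem.List.index?_eq_some_iff]
      refine ⟨((List.range box.length).map (pvMean box)).take i,
        ((List.range box.length).map (pvMean box)).drop (i+1), ?_, ?_, ?_⟩
      · conv_lhs => rw [← List.take_append_drop i ((List.range box.length).map (pvMean box))]
        rw [List.drop_eq_getElem_cons (by simpa using hik)]
        simp
      · simp [hik.le]
      · intro hmm
        rw [← List.map_take, List.take_range] at hmm
        obtain ⟨j, hj, hje⟩ := List.mem_map.mp hmm
        have hji : j < i := by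
          have := List.mem_range.mp hj
          omega
        exact absurd hje (ne_of_lt (hlt j hji))
    rw [Option.getD_some, hidx, Option.getD_some,
      PySem.List.pyGetD_natCast, PySem.List.getD_map_range _ _ _ _ hik, hB]
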